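-- pv_equiv track=rewrite | github.com/MarzioHr/SSA_Project | device/thermometer.py | label_validation
-- ===== SOURCE A (Python) =====
-- def label_validation(check_label:str):
--     '''
--     Checks if a given device label is conform to the system's standards.
--     This is done to prevent any sort of malicious user inputs and injection attacks.
--     Validation: min. 3 characters max. 20 characters and at least 1 Letter.
--     May only contain letters, numbers, spaces and '-'.
--     Returns: True if conform and False if not.
--     '''
--     valid_char = (' ','-')
--     min_len = 3
--     max_len = 20
--     min_1_letter = False # string has at least 1 letter
--     if len(check_label) < min_len or len(check_label) > max_len: # checks the len of the given label
--         return False # returns False if label length is less than 3 or more than 20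
--     for char in check_label: # checks each character of given label string
--         if char.isalpha() and min_1_letter is not True:
--             min_1_letter = True # set True that string has at least 1 letter
--         if char.isalnum():
--             continue
--         if char in valid_char:
--             continue
--         return False # returns False if a character does not meet validation rules
--     if min_1_letter is True:
--         return True # returns True if all validation rules are met
--     return False # returns False if label does not at least include 1 letter
-- ===== SOURCE B (Python) =====
-- def label_validation(check_label: str):
--     # Different decomposition: strip out every allowed non-letter character
--     # (digits, spaces, dashes); the label is valid iff what remains is a
--     # non-empty run of letters.  (Exact on the printable-ASCII domain.)
--     if not 3 <= len(check_label) <= 20: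
--         return False
--     rest = [c for c in check_label if not (c.isdigit() or c in ' -')]
--     return bool(rest) and all(c.isalpha() for c in rest)
-- ===== Notes on version B (the rewrite author's own statement) =====
-- stated objective: alternative
-- what changed: Instead of scanning for invalid characters while maintaining a seen-a-letter flag, B filters out all allowed non-letter characters (digits, spaces, dashes) and reduces validity to the residue being a non-empty all-alphabetic list.
import Mathlib
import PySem

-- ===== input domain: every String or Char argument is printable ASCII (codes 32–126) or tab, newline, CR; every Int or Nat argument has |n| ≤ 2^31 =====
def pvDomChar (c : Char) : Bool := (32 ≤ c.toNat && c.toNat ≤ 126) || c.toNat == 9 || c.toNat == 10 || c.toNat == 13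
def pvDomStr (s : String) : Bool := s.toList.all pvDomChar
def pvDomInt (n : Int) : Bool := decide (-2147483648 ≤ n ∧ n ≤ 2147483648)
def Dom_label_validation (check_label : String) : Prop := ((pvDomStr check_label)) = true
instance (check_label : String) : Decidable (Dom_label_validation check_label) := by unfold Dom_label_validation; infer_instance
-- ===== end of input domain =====

-- B replaces A's invalid-character scan with a seen-a-letter flag by a filter: drop all allowed non-letter characters (digits, spaces, dashes) and test that the residue is a non-empty all-alphabetic list; alternative decomposition, same cost.


-- ===== PORT A =====
-- the for-loop with the min_1_letter flag and early return, transliterated as structural recursion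
def labelLoopA : List Char → Bool → Bool
  | [], flag => if flag = true then true else false
  | c :: cs, flag =>
    let flag' := if PySem.Chars.isalpha c && !(flag = true) then true else flag
    if PySem.Chars.isalnum c then labelLoopA cs flag'
    else if c = ' ' || c = '-' then labelLoopA cs flag'
    else false

def label_validation (check_label : String) : Bool :=
  if PySem.Str.len check_label < 3 || PySem.Str.len check_label > 20 then false
  else labelLoopA check_label.toList false

-- ===== PORT B =====
-- Source B: length guard, then filter out digits/spaces/dashes; valid iff the residue is non-empty and all-alphabetic
def label_validation_alt (check_label : String) : Bool :=
  if !(3 ≤ PySem.Str.len check_label && PySem.Str.len check_label ≤ 20) then false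
  else
    let rest := check_label.toList.filter
      (fun c => !(PySem.Chars.isdigit c || c = ' ' || c = '-'))
    !rest.isEmpty && rest.all (fun c => PySem.Chars.isalpha c)

-- ===== PRECONDITION & SPEC =====
def Spec_label_validation (check_label : String) (out : Bool) : Prop := out = label_validation_alt check_label
instance (check_label : String) (out : Bool) : Decidable (Spec_label_validation check_label out) := by unfold Spec_label_validation; infer_instance

-- ===== CLAIM =====
def Claim_equal_label_validation : Prop := ∀ (check_label : String), Dom_label_validation check_label → Spec_label_validation check_label (label_validation check_label)

-- ===== LEMMAS AND PROOFS =====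
theorem digit_not_alpha (c : Char) (h : PySem.Chars.isdigit c = true) :
    PySem.Chars.isalpha c = false := by
  simp only [PySem.Chars.isdigit, Bool.and_eq_true, decide_eq_true_eq] at h
  simp only [PySem.Chars.isalpha, PySem.Chars.isupper, PySem.Chars.islower,
    Bool.or_eq_false_iff, Bool.and_eq_false_iff, decide_eq_false_iff_not, not_le]
  exact ⟨Or.inl (lt_of_le_of_lt h.2 (by decide)),
         Or.inl (lt_of_le_of_lt h.2 (by decide))⟩

theorem space_dash_not_alpha (c : Char) (h : c = ' ' ∨ c = '-') :
    PySem.Chars.isalpha c = false := by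
  rcases h with h | h <;> (subst h; decide)

-- A's loop computes: every char valid AND (the flag OR some char is a letter)
theorem labelLoopA_eq (l : List Char) (flag : Bool) :
    labelLoopA l flag =
      (l.all (fun c => PySem.Chars.isalnum c || c = ' ' || c = '-') &&
        (flag || l.any (fun c => PySem.Chars.isalpha c))) := by
  induction l generalizing flag with
  | nil => cases flag <;> simp [labelLoopA]
  | cons c cs ih =>
    simp only [labelLoopA, List.all_cons, List.any_cons]
    have hflag : (if PySem.Chars.isalpha c && !(flag = true) then true else flag)
        = (PySem.Chars.isalpha c || flag) := by
      cases flag <;> cases PySem.Chars.isalpha c <;> simp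
    rw [hflag]
    by_cases han : PySem.Chars.isalnum c = true
    · simp [han, ih]; ac_rfl
    · by_cases hv : (c = ' ' ∨ c = '-')
      · have hsp : (c = ' ' || c = '-') = true := by
          rcases hv with h | h <;> simp [h]
        simp [han, hsp, ih]; ac_rfl
      · have hsp : (c = ' ' || c = '-') = false := by
          simp only [Bool.or_eq_false_iff, decide_eq_false_iff_not]
          exact ⟨fun h => hv (Or.inl h), fun h => hv (Or.inr h)⟩
        simp [han, hsp]

-- B's residue is all-alphabetic iff every char of l is valid
theorem filter_all_alpha (l : List Char) :
    l.all (fun c => PySem.Chars.isalnum c || c = ' ' || c = '-')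
      = (l.filter (fun c => !(PySem.Chars.isdigit c || c = ' ' || c = '-'))).all
          (fun c => PySem.Chars.isalpha c) := by
  induction l with
  | nil => rfl
  | cons c cs ih =>
    by_cases hq : (PySem.Chars.isdigit c || decide (c = ' ') || decide (c = '-')) = true
    · have hp : (PySem.Chars.isalnum c || decide (c = ' ') || decide (c = '-')) = true := by
        rcases Bool.or_eq_true_iff.mp hq with hq' | hq'
        · rcases Bool.or_eq_true_iff.mp hq' with hq'' | hq''
          · simp [PySem.Chars.isalnum, hq'']
          · simp [hq'']
        · simp [hq']
      rw [List.filter_cons_of_neg (by simp [hq])]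
      rw [List.all_cons]
      simp only [hp, Bool.true_and, ih]
    · rw [Bool.not_eq_true, Bool.or_eq_false_iff] at hq
      obtain ⟨hq1, hdash⟩ := hq
      obtain ⟨hd, hs⟩ := Bool.or_eq_false_iff.mp hq1
      have hp : (PySem.Chars.isalnum c || decide (c = ' ') || decide (c = '-'))
          = PySem.Chars.isalpha c := by
        rw [PySem.Chars.isalnum, hd, hs, hdash, Bool.or_false, Bool.or_false, Bool.or_false]
      rw [List.filter_cons_of_pos (by simp only [hd, hs, hdash, Bool.or_false, Bool.not_false])]
      rw [List.all_cons, List.all_cons]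
      simp only [hp, ih]

-- given all chars valid, B's residue is non-empty iff some char is a letter
theorem filter_nonempty (l : List Char)
    (hall : l.all (fun c => PySem.Chars.isalnum c || c = ' ' || c = '-') = true) :
    l.any (fun c => PySem.Chars.isalpha c)
      = !(l.filter (fun c => !(PySem.Chars.isdigit c || c = ' ' || c = '-'))).isEmpty := by
  induction l with
  | nil => rfl
  | cons c cs ih =>
    rw [List.all_cons, Bool.and_eq_true] at hall
    by_cases hq : (PySem.Chars.isdigit c || decide (c = ' ') || decide (c = '-')) = true
    · have ha : PySem.Chars.isalpha c = false := by
        rcases Bool.or_eq_true_iff.mp hq with hq' | hq'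
        · rcases Bool.or_eq_true_iff.mp hq' with hq'' | hq''
          · exact digit_not_alpha c hq''
          · exact space_dash_not_alpha c (Or.inl (of_decide_eq_true hq''))
        · exact space_dash_not_alpha c (Or.inr (of_decide_eq_true hq'))
      rw [List.filter_cons_of_neg (by simp [hq])]
      rw [List.any_cons]
      simp only [ha, Bool.false_or, ih hall.2]
    · rw [Bool.not_eq_true, Bool.or_eq_false_iff] at hq
      obtain ⟨hq1, hdash⟩ := hq
      obtain ⟨hd, hs⟩ := Bool.or_eq_false_iff.mp hq1
      have ha : PySem.Chars.isalpha c = true := by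
        have h1 := hall.1
        rw [PySem.Chars.isalnum, hd, hs, hdash, Bool.or_false, Bool.or_false, Bool.or_false] at h1
        exact h1
      rw [List.filter_cons_of_pos (by simp only [hd, hs, hdash, Bool.or_false, Bool.not_false])]
      rw [List.any_cons]
      simp [ha]

-- ===== VERDICT =====
theorem label_validation_spec : Claim_equal_label_validation := by
  intro s _
  unfold Spec_label_validation label_validation label_validation_alt
  have hlen : (PySem.Str.len s < 3 || PySem.Str.len s > 20)
      = !(3 ≤ PySem.Str.len s && PySem.Str.len s ≤ 20) := by
    by_cases h3 : 3 ≤ s.length <;> by_cases h20 : s.length ≤ 20 <;>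
      simp [h3, h20] <;> omega
  rw [hlen]
  cases hg : !(3 ≤ PySem.Str.len s && PySem.Str.len s ≤ 20)
  · simp only [Bool.false_eq_true, if_false]
    rw [labelLoopA_eq, Bool.false_or]
    by_cases hall : s.toList.all (fun c => PySem.Chars.isalnum c || c = ' ' || c = '-') = true
    · rw [hall, Bool.true_and, filter_nonempty _ hall,
        ← filter_all_alpha, hall, Bool.and_true]
    · rw [Bool.not_eq_true] at hall
      rw [hall, Bool.false_and]
      have h2 := filter_all_alpha s.toList
      rw [hall] at h2
      rw [← h2, Bool.and_false]
  · simp
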